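-- pv_equiv track=rewrite | github.com/eliahreeves/spice2sch | src/spice_to_sch/main.py | find_content
-- ===== SOURCE A (Python) =====
-- from typing import List, Tuple
--
-- def find_content(file: List[str]) -> List[str]:
--     start = 0
--     for index, line in enumerate(file):
--         line = line.strip()
--         if line.lower().startswith(".subckt"):
--             start = index
--         elif line.lower().startswith(".ends"):
--             return file[start: index + 1]
--
--     raise ValueError("Invalid format")
-- ===== SOURCE B (Python) =====
-- from typing import List
--
-- def find_content(file: List[str]) -> List[str]:
--     marks = [(i, line.strip().lower()) for i, line in enumerate(file)]
--     ends = [i for i, text in marks if text.startswith(".ends")]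
--     if not ends:
--         raise ValueError("Invalid format")
--     end = ends[0]
--     subs = [i for i, text in marks[:end] if text.startswith(".subckt")]
--     start = subs[-1] if subs else 0
--     return file[start:end + 1]
-- ===== Notes on version B (the rewrite author's own statement) =====
-- stated objective: alternative
-- what changed: Replaced A's single stateful forward scan (mutable start, early return) with a find-the-first-'.ends'-index-then-collect-'.subckt'-indices-before-it decomposition built from comprehensions/filters.
import Mathlib
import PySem

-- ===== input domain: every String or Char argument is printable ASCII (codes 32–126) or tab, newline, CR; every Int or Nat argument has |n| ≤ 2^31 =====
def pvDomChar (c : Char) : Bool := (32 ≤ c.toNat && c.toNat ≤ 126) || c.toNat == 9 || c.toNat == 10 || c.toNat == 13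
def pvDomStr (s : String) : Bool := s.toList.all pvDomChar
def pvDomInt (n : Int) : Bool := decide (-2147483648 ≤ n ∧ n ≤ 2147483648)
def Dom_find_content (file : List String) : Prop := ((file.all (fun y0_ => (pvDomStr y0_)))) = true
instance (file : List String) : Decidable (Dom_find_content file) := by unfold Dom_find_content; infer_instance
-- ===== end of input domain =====

-- B replaces A's stateful forward scan by "find first '.ends' index, then the last '.subckt' index before it" (alternative decomposition, same cost); equivalence of return values is proved on inputs where A returns (Pre_: some line starts with '.ends').

-- ===== PORT A =====
def find_content_go (file : List String) (start : Int) : List (Int × String) → Option (List String)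
  | [] => none
  | (index, line) :: rest =>
    if PySem.Str.startswith (PySem.Str.lower (PySem.Str.strip line)) ".subckt" then
      find_content_go file index rest
    else if PySem.Str.startswith (PySem.Str.lower (PySem.Str.strip line)) ".ends" then
      some (PySem.List.slice file (some start) (some (index + 1)))
    else
      find_content_go file start rest

-- A raises ValueError when the loop falls through; that case is outside Pre_ and the port returns [].
def find_content (file : List String) : List String :=
  (find_content_go file 0 (PySem.List.enumerate file 0)).getD []

-- ===== PORT B =====
def find_content_alt (file : List String) : List String :=
  let marks := (PySem.List.enumerate file 0).map
      (fun p => (p.1, PySem.Str.lower (PySem.Str.strip p.2)))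
  let ends := (marks.filter (fun p => PySem.Str.startswith p.2 ".ends")).map (fun p => p.1)
  match ends with
  | [] => []  -- Source B raises ValueError here; outside Pre_
  | e :: _ =>
    let subs := ((PySem.List.slice marks none (some e)).filter
        (fun p => PySem.Str.startswith p.2 ".subckt")).map (fun p => p.1)
    let start := subs.getLastD 0
    PySem.List.slice file (some start) (some (e + 1))

-- ===== PRECONDITION & SPEC =====
-- Pre_: exactly the inputs on which A returns (some line, stripped and lowercased, starts with ".ends"); elsewhere both Pythons raise ValueError("Invalid format").
def Pre_find_content (file : List String) : Prop :=
  ∃ l ∈ file, PySem.Str.startswith (PySem.Str.lower (PySem.Str.strip l)) ".ends" = true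
instance (file : List String) : Decidable (Pre_find_content file) := by
  unfold Pre_find_content; infer_instance
def pvWitness_find_content : List String := [".subckt top", "m1", ".ends"]
def Spec_find_content (file : List String) (out : List String) : Prop := out = find_content_alt file
instance (file : List String) (out : List String) : Decidable (Spec_find_content file out) := by unfold Spec_find_content; infer_instance

-- ===== CLAIM (what is proved, stated in full; the proofs are below) =====
def Claim_equal_find_content : Prop := ∀ (file : List String), Dom_find_content file → Pre_find_content file → Spec_find_content file (find_content file)

-- ===== LEMMAS AND PROOFS =====

-- abbreviations for the two line tests, used only in proofs
def pvE (l : String) : Bool := PySem.Str.startswith (PySem.Str.lower (PySem.Str.strip l)) ".ends"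
def pvS (l : String) : Bool := PySem.Str.startswith (PySem.Str.lower (PySem.Str.strip l)) ".subckt"

theorem go_cons (file : List String) (start i : Int) (line : String)
    (rest : List (Int × String)) :
    find_content_go file start ((i, line) :: rest) =
      if pvS line = true then find_content_go file i rest
      else if pvE line = true then
        some (PySem.List.slice file (some start) (some (i + 1)))
      else find_content_go file start rest := rfl

theorem pvS_not_pvE (l : String) (h : pvS l = true) : pvE l = false := by
  unfold pvS at h
  unfold pvE
  rw [PySem.Str.startswith_eq, PySem.Chars.startswith_iff] at h
  by_contra hb
  rw [Bool.not_eq_false, PySem.Str.startswith_eq, PySem.Chars.startswith_iff] at hb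
  obtain ⟨t1, h1⟩ := h
  obtain ⟨t2, h2⟩ := hb
  rw [← h1] at h2
  simp at h2

-- value of A's loop in terms of filter/takeWhile on the remaining (index, line) pairs
theorem go_eq (file : List String) : ∀ (ps : List (Int × String)) (start : Int),
    find_content_go file start ps =
      match ps.filter (fun p => pvE p.2) with
      | [] => none
      | (e, _) :: _ =>
        some (PySem.List.slice file
          (some ((((ps.takeWhile (fun p => !pvE p.2)).filter (fun p => pvS p.2)).map
              (fun p => p.1)).getLastD start))
          (some (e + 1)))
  | [], start => rfl
  | (i, line) :: rest, start => by
    rw [go_cons]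
    by_cases hS : pvS line = true
    · have hE := pvS_not_pvE line hS
      rw [if_pos hS, go_eq file rest i]
      simp only [List.filter_cons, List.takeWhile_cons, hE, hS, Bool.not_false,
        Bool.false_eq_true, if_false, if_true, List.map_cons, List.getLastD_cons]
    · rw [Bool.not_eq_true] at hS
      rw [if_neg (by simp [hS])]
      by_cases hE : pvE line = true
      · rw [if_pos hE]
        simp only [List.filter_cons, List.takeWhile_cons, hE, Bool.not_true,
          if_true, if_false, Bool.false_eq_true, List.filter_nil,
          List.map_nil, List.getLastD_nil]
      · rw [Bool.not_eq_true] at hE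
        rw [if_neg (by simp [hE]), go_eq file rest start]
        simp only [List.filter_cons, List.takeWhile_cons, hE, hS, Bool.not_false,
          Bool.false_eq_true, if_false, if_true]

-- the first matching pair's index e locates the takeWhile prefix: it is take (e - s)
theorem takeWhile_eq_take (xs : List String) : ∀ (s e : Int) (l : String), 0 ≤ s →
    (PySem.List.enumerate xs s).find? (fun p => pvE p.2) = some (e, l) →
    s ≤ e ∧ (PySem.List.enumerate xs s).takeWhile (fun p => !pvE p.2) =
      (PySem.List.enumerate xs s).take (e - s).toNat := by
  induction xs with
  | nil => intro s e l _ h; simp [PySem.List.enumerate_nil] at h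
  | cons x xs ih =>
    intro s e l hs h
    rw [PySem.List.enumerate_cons] at h ⊢
    by_cases hE : pvE x = true
    · rw [List.find?_cons_of_pos (by simpa using hE)] at h
      have he : e = s := by
        have := congrArg (fun o => Option.map Prod.fst o) h
        simp at this; omega
      subst he
      refine ⟨le_refl _, ?_⟩
      simp [hE]
    · rw [Bool.not_eq_true] at hE
      rw [List.find?_cons_of_neg (by simpa using hE)] at h
      obtain ⟨hse, htw⟩ := ih (s + 1) e l (by omega) h
      refine ⟨by omega, ?_⟩
      have hnat : (e - s).toNat = (e - (s + 1)).toNat + 1 := by omega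
      simp [hE, hnat, htw]

-- ===== VERDICT (by name: the statement is the Claim_ definition above) =====
set_option maxHeartbeats 1000000 in
theorem find_content_spec : Claim_equal_find_content := by
  intro file _ _
  unfold Spec_find_content find_content
  simp only [find_content_alt]
  rw [go_eq]
  rw [List.filter_map, List.map_map]
  have hfilter : ((PySem.List.enumerate file 0).filter
      ((fun p => PySem.Str.startswith p.2 ".ends") ∘
        (fun (p : Int × String) => (p.1, PySem.Str.lower (PySem.Str.strip p.2))))) =
      (PySem.List.enumerate file 0).filter (fun p => pvE p.2) :=
    List.filter_congr (by intro a _; simp [Function.comp, pvE])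
  rw [hfilter]
  cases hf : (PySem.List.enumerate file 0).filter (fun p => pvE p.2) with
  | nil => simp
  | cons p rest =>
    obtain ⟨e, l⟩ := p
    have hfind : (PySem.List.enumerate file 0).find? (fun p => pvE p.2) = some (e, l) := by
      rw [← List.head?_filter, hf]; rfl
    obtain ⟨he0, htw⟩ := takeWhile_eq_take file 0 e l le_rfl hfind
    have hslice : PySem.List.slice ((PySem.List.enumerate file 0).map
        (fun p => (p.1, PySem.Str.lower (PySem.Str.strip p.2)))) none (some e) =
        ((PySem.List.enumerate file 0).takeWhile (fun p => !pvE p.2)).map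
          (fun p => (p.1, PySem.Str.lower (PySem.Str.strip p.2))) := by
      rw [PySem.List.slice_to _ he0, ← List.map_take, htw]
      norm_num
    have hcomp : ((fun (p : Int × String) => p.1) ∘
        (fun (p : Int × String) => (p.1, PySem.Str.lower (PySem.Str.strip p.2)))) =
        fun (p : Int × String) => p.1 := rfl
    have hfilter2 : ∀ (zs : List (Int × String)),
        zs.filter ((fun p => PySem.Str.startswith p.2 ".subckt") ∘
          (fun (p : Int × String) => (p.1, PySem.Str.lower (PySem.Str.strip p.2)))) =
        zs.filter (fun p => pvS p.2) :=
      fun zs => List.filter_congr (by intro a _; simp [Function.comp, pvS])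
    simp only [List.map_cons, hslice, List.filter_map, List.map_map,
      Option.getD_some, hcomp, hfilter2]
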